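-- pv_equiv track=rewrite | github.com/jvzhang12/vantage_v5 | src/vantage_v5/services/scenario_lab.py | _looks_outcome_biased
-- ===== SOURCE A (Python) =====
-- def _looks_outcome_biased(title: str) -> bool:
--     lowered = title.lower()
--     return any(
--         phrase in lowered
--         for phrase in [
--             "best fit",
--             "is best",
--             "recommended",
--             "recommendation",
--             "winner",
--             "should choose",
--             "should pursue",
--             "should use",
--         ]
--     )
-- ===== SOURCE B (Python) =====
-- import re
--
-- _BIAS_RE = re.compile(
--     "best fit|is best|recommended|recommendation|winner"
--     "|should choose|should pursue|should use"
-- )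
--
--
-- def _looks_outcome_biased(title: str) -> bool:
--     return bool(_BIAS_RE.search(title.lower()))
-- ===== Notes on version B (the rewrite author's own statement) =====
-- stated objective: idiomatic
-- what changed: Replaces eight separate substring membership scans with one compiled regular expression (an alternation of the same eight literal phrases) searched in a single pass over the lowered title.
import Mathlib
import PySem

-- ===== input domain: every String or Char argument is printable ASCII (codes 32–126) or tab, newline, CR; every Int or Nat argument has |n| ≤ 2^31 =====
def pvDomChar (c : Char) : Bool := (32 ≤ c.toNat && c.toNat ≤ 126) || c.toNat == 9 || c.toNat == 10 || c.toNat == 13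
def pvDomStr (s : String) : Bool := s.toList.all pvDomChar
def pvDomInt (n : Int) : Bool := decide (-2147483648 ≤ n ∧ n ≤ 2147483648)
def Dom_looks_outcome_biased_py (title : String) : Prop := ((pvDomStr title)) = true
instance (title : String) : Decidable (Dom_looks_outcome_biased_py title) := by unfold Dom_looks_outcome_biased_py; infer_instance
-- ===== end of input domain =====

-- B replaces the eight per-phrase substring scans with a single compiled regex
-- (alternation of the same eight literals) searched once over the lowered title.

-- ===== PORT A =====
def looks_outcome_biased_py (title : String) : Bool :=
  let lowered := PySem.Str.lower title
  ([ "best fit", "is best", "recommended", "recommendation", "winner",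
     "should choose", "should pursue", "should use" ] : List String).any
    (fun phrase => PySem.Str.isIn phrase lowered)

-- ===== PORT B =====
-- the alternatives of the compiled pattern _BIAS_RE
def pvAlternatives : List String :=
  [ "best fit", "is best", "recommended", "recommendation", "winner",
    "should choose", "should pursue", "should use" ]

-- re.search on an alternation of literals, ported by hand (PySem has no regex):
-- exact regex-engine semantics — advance the start position left to right and
-- at each position try the alternatives in pattern order.
def pvReSearchAlt (ps : List String) : List Char → Bool
  | [] => ps.any (fun p => p.toList.isPrefixOf ([] : List Char))
  | c :: cs => ps.any (fun p => p.toList.isPrefixOf (c :: cs)) || pvReSearchAlt ps cs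

def looks_outcome_biased_py_alt (title : String) : Bool :=
  pvReSearchAlt pvAlternatives (PySem.Chars.lower title.toList)

-- ===== PRECONDITION & SPEC =====
def Spec_looks_outcome_biased_py (title : String) (out : Bool) : Prop := out = looks_outcome_biased_py_alt title
instance (title : String) (out : Bool) : Decidable (Spec_looks_outcome_biased_py title out) := by unfold Spec_looks_outcome_biased_py; infer_instance

-- ===== CLAIM =====
def Claim_equal_looks_outcome_biased_py : Prop := ∀ (title : String), Dom_looks_outcome_biased_py title → Spec_looks_outcome_biased_py title (looks_outcome_biased_py title)

-- ===== LEMMAS AND PROOFS =====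

-- the position-by-position regex scan succeeds iff some alternative is an infix
theorem pvReSearchAlt_eq (ps : List String) (l : List Char) :
    pvReSearchAlt ps l = ps.any (fun p => PySem.Chars.isIn p.toList l) := by
  induction l with
  | nil =>
      apply Bool.eq_iff_iff.mpr
      simp [pvReSearchAlt, List.any_eq_true, List.isPrefixOf_iff_prefix,
            PySem.Chars.isIn_iff_infix]
  | cons c cs ih =>
      apply Bool.eq_iff_iff.mpr
      simp only [pvReSearchAlt, ih, Bool.or_eq_true, List.any_eq_true,
                 List.isPrefixOf_iff_prefix, PySem.Chars.isIn_iff_infix,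
                 List.infix_cons_iff]
      constructor
      · rintro (⟨p, hp, h⟩ | ⟨p, hp, h⟩)
        · exact ⟨p, hp, Or.inl h⟩
        · exact ⟨p, hp, Or.inr h⟩
      · rintro ⟨p, hp, h | h⟩
        · exact Or.inl ⟨p, hp, h⟩
        · exact Or.inr ⟨p, hp, h⟩

-- ===== VERDICT =====
theorem looks_outcome_biased_py_spec : Claim_equal_looks_outcome_biased_py := by
  intro title _
  unfold Spec_looks_outcome_biased_py looks_outcome_biased_py looks_outcome_biased_py_alt
  rw [pvReSearchAlt_eq]
  simp [pvAlternatives, PySem.Str.isIn, PySem.Str.lower]
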